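-- pv_equiv track=rewrite | github.com/khashayarkhaj/Adaptive-Tamaraw | src/utils/dataset_utils.py | last_packet_stats
-- ===== SOURCE A (Python) =====
-- def last_packet_stats(trace, dummy_code=888, real_code=1):
--     """
--     Find indices of the last dummy and real packets in the (defended) trace.
--
--     :param trace: List of [timestamp, direction] pairs
--     :param dummy_code: Code indicating dummy packets (default: 888)
--     :param real_code: Code indicating real packets (default: 1)
--     :return: Tuple of (last_dummy_outgoing_idx, last_dummy_incoming_idx,
--                        last_real_outgoing_idx, last_real_incoming_idx)
--     """
--     last_dummy_outgoing_idx = -1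
--     last_dummy_incoming_idx = -1
--     last_real_outgoing_idx = -1
--     last_real_incoming_idx = -1
--
--     for i, (_, direction) in enumerate(trace):
--         # Determine if it's a dummy or real packet based on the code
--         packet_type = dummy_code if abs(direction) == dummy_code else real_code
--
--         if packet_type == dummy_code:
--             if direction > 0:
--                 last_dummy_outgoing_idx = i
--             elif direction < 0:
--                 last_dummy_incoming_idx = i
--         elif packet_type == real_code:
--             if direction > 0:
--                 last_real_outgoing_idx = i
--             elif direction < 0:
--                 last_real_incoming_idx = i
--
--     return (last_dummy_outgoing_idx,
--             last_dummy_incoming_idx,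
--             last_real_outgoing_idx,
--             last_real_incoming_idx)
-- ===== SOURCE B (Python) =====
-- def last_packet_stats(trace, dummy_code=888, real_code=1):
--     def last_index(pred):
--         for i in range(len(trace) - 1, -1, -1):
--             if pred(trace[i][1]):
--                 return i
--         return -1
--     return (last_index(lambda d: abs(d) == dummy_code and d > 0),
--             last_index(lambda d: abs(d) == dummy_code and d < 0),
--             last_index(lambda d: abs(d) != dummy_code and d > 0),
--             last_index(lambda d: abs(d) != dummy_code and d < 0))
-- ===== Notes on version B (the rewrite author's own statement) =====
-- stated objective: alternative
-- what changed: Replaces the single forward pass that keeps four mutable last-seen slots by four independent backward scans, each returning the index of the first match from the end (default -1).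
-- outside the precondition, e.g. on last_packet_stats([(0, 5), (1, -5), (2, 3)], 5, 5): A returns (2, 1, -1, -1), B returns (0, 1, 2, -1)
import Mathlib
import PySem

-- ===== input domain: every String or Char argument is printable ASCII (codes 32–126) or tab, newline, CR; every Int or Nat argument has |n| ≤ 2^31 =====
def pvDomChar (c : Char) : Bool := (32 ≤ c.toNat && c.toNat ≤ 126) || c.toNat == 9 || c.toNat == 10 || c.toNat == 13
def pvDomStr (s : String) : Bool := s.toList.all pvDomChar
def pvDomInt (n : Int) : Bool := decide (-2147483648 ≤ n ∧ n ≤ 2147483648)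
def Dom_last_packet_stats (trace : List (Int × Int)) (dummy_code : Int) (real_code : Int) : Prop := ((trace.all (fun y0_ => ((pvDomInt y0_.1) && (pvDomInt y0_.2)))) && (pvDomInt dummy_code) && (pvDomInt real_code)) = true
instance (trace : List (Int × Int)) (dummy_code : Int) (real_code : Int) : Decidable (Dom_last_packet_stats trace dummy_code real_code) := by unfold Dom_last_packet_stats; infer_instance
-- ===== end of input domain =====

-- B replaces A's single forward pass with four mutable last-seen slots by four
-- independent backward scans, each returning the first matching index from the end.

-- ===== PORT A =====
-- one forward pass over enumerate(trace), updating four slots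
def last_packet_stats (trace : List (Int × Int)) (dummy_code : Int) (real_code : Int) : Int × Int × Int × Int :=
  (PySem.List.enumerate trace 0).foldl
    (fun s p =>
      let (ldo, ldi, lro, lri) := s
      let i := p.1
      let direction := p.2.2
      let packet_type := if |direction| = dummy_code then dummy_code else real_code
      if packet_type = dummy_code then
        if direction > 0 then (i, ldi, lro, lri)
        else if direction < 0 then (ldo, i, lro, lri)
        else (ldo, ldi, lro, lri)
      else if packet_type = real_code then
        if direction > 0 then (ldo, ldi, i, lri)
        else if direction < 0 then (ldo, ldi, lro, i)
        else (ldo, ldi, lro, lri)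
      else (ldo, ldi, lro, lri))
    (-1, -1, -1, -1)

-- ===== PORT B =====
-- backward index loop: first match from the end, default -1
def pvLastIndexAux (pred : Int → Bool) : List (Int × (Int × Int)) → Int
  | [] => -1
  | (i, p) :: rest => if pred p.2 then i else pvLastIndexAux pred rest

def last_packet_stats_alt (trace : List (Int × Int)) (dummy_code : Int) (real_code : Int) : Int × Int × Int × Int :=
  let rev := (PySem.List.enumerate trace 0).reverse
  (pvLastIndexAux (fun d => |d| == dummy_code && d > 0) rev,
   pvLastIndexAux (fun d => |d| == dummy_code && d < 0) rev,
   pvLastIndexAux (fun d => !(|d| == dummy_code) && d > 0) rev,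
   pvLastIndexAux (fun d => !(|d| == dummy_code) && d < 0) rev)

-- ===== PRECONDITION & SPEC =====
-- Pre_ excludes dummy_code = real_code, a degenerate configuration on which A's
-- else-branch classification collapses (every packet is recorded as dummy) while B's
-- classification by abs(direction) is equally defensible; neither value is specified.
def Pre_last_packet_stats (trace : List (Int × Int)) (dummy_code : Int) (real_code : Int) : Prop :=
  dummy_code ≠ real_code
instance (trace : List (Int × Int)) (dummy_code : Int) (real_code : Int) : Decidable (Pre_last_packet_stats trace dummy_code real_code) := by unfold Pre_last_packet_stats; infer_instance

def pvWitness_last_packet_stats : (List (Int × Int)) × Int × Int := ([(0, 888), (1, -888), (2, 1), (3, -1)], 888, 1)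

def Spec_last_packet_stats (trace : List (Int × Int)) (dummy_code : Int) (real_code : Int) (out : Int × Int × Int × Int) : Prop := out = last_packet_stats_alt trace dummy_code real_code
instance (trace : List (Int × Int)) (dummy_code : Int) (real_code : Int) (out : Int × Int × Int × Int) : Decidable (Spec_last_packet_stats trace dummy_code real_code out) := by unfold Spec_last_packet_stats; infer_instance

-- ===== CLAIM (what is proved, stated in full; the proofs are below) =====
def Claim_equal_last_packet_stats : Prop := ∀ (trace : List (Int × Int)) (dummy_code : Int) (real_code : Int), Dom_last_packet_stats trace dummy_code real_code → Pre_last_packet_stats trace dummy_code real_code → Spec_last_packet_stats trace dummy_code real_code (last_packet_stats trace dummy_code real_code)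

-- ===== LEMMAS AND PROOFS =====

theorem last_packet_stats_eq_alt (trace : List (Int × Int)) (dc rc : Int) (h : dc ≠ rc) :
    last_packet_stats trace dc rc = last_packet_stats_alt trace dc rc := by
  induction trace using List.reverseRecOn with
  | nil => rfl
  | append_singleton l x ih =>
    have hx : PySem.List.enumerate (l ++ [x]) 0 =
        PySem.List.enumerate l 0 ++ [((l.length : Int), x)] := by
      rw [PySem.List.enumerate_append]; simp [PySem.List.enumerate_cons]
    simp only [last_packet_stats, last_packet_stats_alt, hx, List.foldl_append,
      List.foldl_cons, List.foldl_nil, List.reverse_append, List.reverse_cons,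
      List.reverse_nil, List.nil_append, List.cons_append, pvLastIndexAux]
    simp only [last_packet_stats, last_packet_stats_alt] at ih
    rw [ih]
    rcases abs_choice x.2 with habs | habs <;>
      by_cases h1 : |x.2| = dc <;> rcases lt_trichotomy x.2 0 with hd | hd | hd <;>
        simp [h1, hd, h, Ne.symm h] <;>
          first
          | omega
          | (split_ifs <;> first | rfl | omega)

-- ===== VERDICT (by name: the statement is the Claim_ definition above) =====
theorem last_packet_stats_spec : Claim_equal_last_packet_stats := by
  intro trace dc rc _ hpre
  exact last_packet_stats_eq_alt trace dc rc hpre
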